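-- pv_equiv track=rewrite | github.com/JordanKoeller/InterviewPrep | Technical/MockInterviews/longest_palindrome_substring.py | get_num_palindromes_around_plateau
-- ===== SOURCE A (Python) =====
-- def get_num_palindromes_around_plateau(string, pivot): # aBBa
--   i = 1
--   count = 1
--   while pivot - i >= 0 and pivot + i + 1 < len(string):
--     if string[pivot - i] == string[pivot + i + 1]:
--       count += 1
--       i += 1
--     else:
--       return count
--   return count
-- ===== SOURCE B (Python) =====
-- def get_num_palindromes_around_plateau(string, pivot):
--     left = string[:max(pivot, 0)][::-1]
--     right = string[pivot + 2:]
--     count = 1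
--     for a, b in zip(left, right):
--         if a != b:
--             break
--         count += 1
--     return count
-- ===== Notes on version B (the rewrite author's own statement) =====
-- stated objective: simpler
-- what changed: Replaces the outward index-arithmetic while-loop with slicing: the reversed prefix string[:max(pivot,0)] and the suffix string[pivot+2:] are zipped and the answer is 1 plus the length of their matching prefix.
import Mathlib
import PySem

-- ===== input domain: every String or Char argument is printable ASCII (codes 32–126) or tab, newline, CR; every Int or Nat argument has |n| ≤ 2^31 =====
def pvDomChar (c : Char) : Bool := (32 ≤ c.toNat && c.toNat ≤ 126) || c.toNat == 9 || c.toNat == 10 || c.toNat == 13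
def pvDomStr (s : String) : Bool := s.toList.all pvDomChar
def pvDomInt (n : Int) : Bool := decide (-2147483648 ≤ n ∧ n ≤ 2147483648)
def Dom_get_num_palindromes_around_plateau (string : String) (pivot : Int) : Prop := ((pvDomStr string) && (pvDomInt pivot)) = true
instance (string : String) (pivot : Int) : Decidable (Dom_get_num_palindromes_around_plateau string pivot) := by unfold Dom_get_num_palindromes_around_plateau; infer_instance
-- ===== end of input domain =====

-- B replaces A's outward index-arithmetic loop by zipping the reversed left prefix with the right suffix (simpler decomposition; return value only, no side effects).

-- ===== PORT A =====
-- while-loop of A as a recursion over the same state (i, count)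
def pvALoop (cs : List Char) (pivot i count : Int) : Int :=
  if h : pivot - i ≥ 0 ∧ pivot + i + 1 < (cs.length : Int) then
    if PySem.List.pyGet? cs (pivot - i) = PySem.List.pyGet? cs (pivot + i + 1) then
      pvALoop cs pivot (i + 1) (count + 1)
    else count
  else count
termination_by ((cs.length : Int) - (pivot + i + 1)).toNat
decreasing_by omega

def get_num_palindromes_around_plateau (string : String) (pivot : Int) : Int :=
  pvALoop string.toList pivot 1 1

-- ===== PORT B =====
-- the for-loop of Source B over zip(left, right), breaking on the first mismatch
def pvBLoop : List (Char × Char) → Int → Int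
  | [], count => count
  | (a, b) :: rest, count => if a = b then pvBLoop rest (count + 1) else count

def get_num_palindromes_around_plateau_alt (string : String) (pivot : Int) : Int :=
  let cs := string.toList
  let left := (PySem.List.slice cs none (some (max pivot 0))).reverse
  let right := PySem.List.slice cs (some (pivot + 2)) none
  pvBLoop (left.zip right) 1

-- ===== PRECONDITION & SPEC =====
def Spec_get_num_palindromes_around_plateau (string : String) (pivot : Int) (out : Int) : Prop := out = get_num_palindromes_around_plateau_alt string pivot
instance (string : String) (pivot : Int) (out : Int) : Decidable (Spec_get_num_palindromes_around_plateau string pivot out) := by unfold Spec_get_num_palindromes_around_plateau; infer_instance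

-- ===== CLAIM (what is proved, stated in full; the proofs are below) =====
def Claim_equal_get_num_palindromes_around_plateau : Prop := ∀ (string : String) (pivot : Int), Dom_get_num_palindromes_around_plateau string pivot → Spec_get_num_palindromes_around_plateau string pivot (get_num_palindromes_around_plateau string pivot)

-- ===== LEMMAS AND PROOFS =====

-- main loop correspondence: A's loop at i = j+1 computes B's loop on the zip with the first j pairs dropped
lemma pvLoop_eq (l : List (Char × Char)) : ∀ (cs : List Char) (P j : Nat) (count : Int),
    l = (((cs.take P).reverse).zip (cs.drop (P + 2))).drop j →
    pvALoop cs (P : Int) ((j : Int) + 1) count = pvBLoop l count := by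
  induction l with
  | nil =>
    intro cs P j count hl
    have hzlen : (((cs.take P).reverse).zip (cs.drop (P + 2))).length
        = min (min P cs.length) (cs.length - (P + 2)) := by
      simp [List.length_zip, List.length_reverse, List.length_take, List.length_drop]
    have hlen : (((cs.take P).reverse).zip (cs.drop (P + 2))).length ≤ j := by
      have := congrArg List.length hl
      simp [List.length_drop] at this
      omega
    rw [hzlen] at hlen
    rw [pvALoop]
    have hcond : ¬ ((P : Int) - ((j : Int) + 1) ≥ 0 ∧ (P : Int) + ((j : Int) + 1) + 1 < (cs.length : Int)) := by
      omega
    rw [dif_neg hcond]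
    rfl
  | cons hd tl ih =>
    intro cs P j count hl
    obtain ⟨a, b⟩ := hd
    have hlen : j < (((cs.take P).reverse).zip (cs.drop (P + 2))).length := by
      by_contra h
      rw [List.drop_eq_nil_of_le (by omega)] at hl
      simp at hl
    have hzlen : (((cs.take P).reverse).zip (cs.drop (P + 2))).length
        = min (min P cs.length) (cs.length - (P + 2)) := by
      simp [List.length_zip, List.length_reverse, List.length_take, List.length_drop]
    have hjP : j < P := by omega
    have hjlen : P + 2 + j < cs.length := by omega
    have hget : (((cs.take P).reverse).zip (cs.drop (P + 2)))[j]'hlen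
        = ((cs.take P).reverse[j]'(by simp [List.length_reverse, List.length_take]; omega),
           (cs.drop (P + 2))[j]'(by simp [List.length_drop]; omega)) := by
      simp [List.getElem_zip]
    have hL : (cs.take P).reverse[j]'(by simp [List.length_reverse, List.length_take]; omega)
        = cs[P - 1 - j]'(by omega) := by
      rw [List.getElem_reverse]
      simp [List.length_take]
      congr 1
      omega
    have hR : (cs.drop (P + 2))[j]'(by simp [List.length_drop]; omega)
        = cs[P + 2 + j]'(by omega) := by
      simp [List.getElem_drop]
    have hcons : ((((cs.take P).reverse).zip (cs.drop (P + 2))).drop j)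
        = (((cs.take P).reverse).zip (cs.drop (P + 2)))[j]'hlen
            :: ((((cs.take P).reverse).zip (cs.drop (P + 2))).drop (j + 1)) :=
      List.drop_eq_getElem_cons hlen
    rw [hcons, hget, hL, hR] at hl
    injection hl with h1 htl
    injection h1 with ha hb
    rw [pvALoop]
    have hcond : (P : Int) - ((j : Int) + 1) ≥ 0 ∧ (P : Int) + ((j : Int) + 1) + 1 < (cs.length : Int) := by
      constructor <;> omega
    rw [dif_pos hcond]
    have hidx1 : (P : Int) - ((j : Int) + 1) = ((P - 1 - j : Nat) : Int) := by omega
    have hidx2 : (P : Int) + ((j : Int) + 1) + 1 = ((P + 2 + j : Nat) : Int) := by omega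
    have hg1 : PySem.List.pyGet? cs ((P : Int) - ((j : Int) + 1)) = some (cs[P - 1 - j]'(by omega)) := by
      rw [hidx1, PySem.List.pyGet?_natCast]
      exact List.getElem?_eq_getElem (by omega)
    have hg2 : PySem.List.pyGet? cs ((P : Int) + ((j : Int) + 1) + 1) = some (cs[P + 2 + j]'(by omega)) := by
      rw [hidx2, PySem.List.pyGet?_natCast]
      exact List.getElem?_eq_getElem (by omega)
    rw [hg1, hg2]
    subst ha; subst hb
    by_cases heq : (cs[P - 1 - j]'(by omega) : Char) = cs[P + 2 + j]'(by omega)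
    · rw [if_pos (by rw [heq]), pvBLoop, if_pos heq]
      have : (P : Int) + ((j : Int) + 1) + 1 = (P : Int) + (((j + 1 : Nat) : Int) + 1) := by push_cast; ring
      have hrec := ih cs P (j + 1) (count + 1) htl
      have hcast : ((j : Int) + 1) + 1 = ((j + 1 : Nat) : Int) + 1 := by push_cast; ring
      rw [hcast]
      exact hrec
    · rw [if_neg (by simpa using heq), pvBLoop, if_neg heq]

theorem get_num_palindromes_around_plateau_eq (string : String) (pivot : Int) :
    get_num_palindromes_around_plateau string pivot = get_num_palindromes_around_plateau_alt string pivot := by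
  show pvALoop string.toList pivot 1 1
      = pvBLoop (((PySem.List.slice string.toList none (some (max pivot 0))).reverse).zip
          (PySem.List.slice string.toList (some (pivot + 2)) none)) 1
  set cs := string.toList with hcs
  by_cases hp : pivot ≤ 0
  · -- left side empty; A's loop condition fails immediately
    have hmax : max pivot 0 = 0 := max_eq_right hp
    rw [hmax, pvALoop, dif_neg (by omega),
      PySem.List.slice_to cs (b := (0 : Int)) (by omega)]
    rfl
  · have hp' : 0 < pivot := by omega
    have hP : pivot = ((pivot.toNat : Nat) : Int) := by omega
    have hmax : max pivot 0 = pivot := max_eq_left (by omega)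
    rw [hmax]
    have hleft : PySem.List.slice cs none (some pivot) = cs.take pivot.toNat :=
      PySem.List.slice_to cs (by omega)
    have hright : PySem.List.slice cs (some (pivot + 2)) none = cs.drop (pivot + 2).toNat :=
      PySem.List.slice_from cs (by omega)
    rw [hleft, hright]
    have h2 : (pivot + 2).toNat = pivot.toNat + 2 := by omega
    rw [h2]
    have := pvLoop_eq ((((cs.take pivot.toNat).reverse).zip (cs.drop (pivot.toNat + 2))).drop 0)
      cs pivot.toNat 0 1 rfl
    simp only [List.drop_zero, Nat.cast_zero, zero_add] at this
    rw [← hP] at this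
    exact this

-- ===== VERDICT (by name: the statement is the Claim_ definition above) =====
theorem get_num_palindromes_around_plateau_spec : Claim_equal_get_num_palindromes_around_plateau := by
  intro string pivot _
  unfold Spec_get_num_palindromes_around_plateau
  exact get_num_palindromes_around_plateau_eq string pivot
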